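-- pv_equiv track=rewrite | github.com/dgier/FD3_cellular_automata | 3_state_cellular_automata.py | three_state_lookup_table
-- ===== SOURCE A (Python) =====
-- def three_state_lookup_table(rule_number):
--     '''
--     Returns a dictionary which maps 3-state cellular automata neighborhoods to output values.
--     Uses Wolfram rule number convention.
--
--     Parameters
--     ----------
--     rule_number: int
--         Integer value between 0 and 19682, inclusive. Specifies the CA lookup table
--         according to the Wolfram numbering scheme.
--
--     Returns
--     -------
--     lookup_table: dict
--         Lookup table dictionary that maps neighborhood tuples to their output according to the
--         ECA local evolution rule (i.e. the lookup table), as specified by the rule number.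
--     '''
--     if not isinstance(rule_number, int) or rule_number < 0 or rule_number > 19682:
--         raise ValueError("rule_number must be an int between 0 and 19682, inclusive")
--     neighborhoods = [(0,0), (0,1), (0,2), (1,0), (1,1), (1,2), (2,0), (2,1), (2,2)]
--
--     tern_nums = []
--     while rule_number > 0:
--         rule_number, r = divmod(rule_number,3)
--         tern_nums.append(str(r))
--     tern_num = ''.join(reversed(tern_nums))
--
--     in_ternary = '{:{fill}{align}{width}}'.format(tern_num,
--                                                   fill='0',
--                                                   align='>',
--                                                   width='9')
--
--     return dict(zip(neighborhoods, map(int,reversed(in_ternary)))) # use map so that outputs are ints, not strings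
-- ===== SOURCE B (Python) =====
-- def three_state_lookup_table(rule_number):
--     if not isinstance(rule_number, int) or rule_number < 0 or rule_number > 19682:
--         raise ValueError("rule_number must be an int between 0 and 19682, inclusive")
--     neighborhoods = [(0,0), (0,1), (0,2), (1,0), (1,1), (1,2), (2,0), (2,1), (2,2)]
--     # neighborhoods[i] holds ternary digit i (least significant first): no string
--     # formatting, padding or reversing needed.
--     return {nb: (rule_number // 3**i) % 3 for i, nb in enumerate(neighborhoods)}
-- ===== Notes on version B (the rewrite author's own statement) =====
-- stated objective: simpler
-- what changed: B computes each neighborhood's output directly as (rule_number // 3**i) % 3 in one dict comprehension, removing A's while-loop digit list, string join, 9-wide zero-padding format, reverse and int-remapping pipeline.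
import Mathlib
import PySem

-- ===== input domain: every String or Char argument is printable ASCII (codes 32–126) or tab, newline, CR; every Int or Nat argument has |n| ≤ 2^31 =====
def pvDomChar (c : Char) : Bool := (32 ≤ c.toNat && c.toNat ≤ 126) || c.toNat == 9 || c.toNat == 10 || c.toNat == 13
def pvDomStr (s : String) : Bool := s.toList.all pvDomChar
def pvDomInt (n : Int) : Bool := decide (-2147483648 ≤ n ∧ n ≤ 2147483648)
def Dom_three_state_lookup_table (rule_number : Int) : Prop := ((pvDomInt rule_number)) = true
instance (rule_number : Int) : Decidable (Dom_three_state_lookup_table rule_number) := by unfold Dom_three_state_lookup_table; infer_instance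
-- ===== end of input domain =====

-- B replaces A's digit-string/pad/reverse pipeline by direct per-neighborhood arithmetic: simpler.

-- ===== PORT A =====
-- the while loop: while rule_number > 0: rule_number, r = divmod(rule_number, 3); tern_nums.append(str(r))
def pvTernLoop (n : Int) (acc : List String) : List String :=
  if 0 < n then
    pvTernLoop (PySem.Int.floordiv n 3) (acc ++ [PySem.Int.toStr (PySem.Int.mod n 3)])
  else acc
termination_by n.toNat
decreasing_by
  rename_i h
  rw [PySem.Int.floordiv_eq_ediv_of_pos (by norm_num)]
  omega

def three_state_lookup_table (rule_number : Int) : List (Int × Int × Int) :=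
  let neighborhoods : List (Int × Int) := [(0,0),(0,1),(0,2),(1,0),(1,1),(1,2),(2,0),(2,1),(2,2)]
  let tern_nums := pvTernLoop rule_number []
  let tern_num := PySem.Str.join "" tern_nums.reverse
  -- '{:{fill}{align}{width}}'.format(tern_num, fill='0', align='>', width='9'): right-align,
  -- left-pad with '0' to width 9 — ported by hand on List Char (exact for this format spec)
  let in_ternary : List Char := List.replicate (9 - tern_num.toList.length) '0' ++ tern_num.toList
  -- map(int, reversed(in_ternary)): every char here is a ternary digit, so int() never raises
  let digits : List Int := in_ternary.reverse.map (fun c => (PySem.Int.ofChars? [c]).getD 0)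
  -- dict(zip(...)): the nine neighborhood keys are distinct, so the dict is the zipped pair list
  (neighborhoods.zip digits).map (fun p => (p.1.1, p.1.2, p.2))

-- ===== PORT B =====
def three_state_lookup_table_alt (rule_number : Int) : List (Int × Int × Int) :=
  let neighborhoods : List (Int × Int) := [(0,0),(0,1),(0,2),(1,0),(1,1),(1,2),(2,0),(2,1),(2,2)]
  (PySem.List.enumerate neighborhoods).map
    (fun p => (p.2.1, p.2.2, PySem.Int.mod (PySem.Int.floordiv rule_number (3 ^ p.1.toNat)) 3))

-- ===== PRECONDITION & SPEC =====
-- A raises ValueError outside 0..19682; Pre_ is exactly the inputs A accepts.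
def Pre_three_state_lookup_table (rule_number : Int) : Prop :=
  0 ≤ rule_number ∧ rule_number ≤ 19682
instance (rule_number : Int) : Decidable (Pre_three_state_lookup_table rule_number) := by
  unfold Pre_three_state_lookup_table; infer_instance

def pvWitness_three_state_lookup_table : Int := 5

def Spec_three_state_lookup_table (rule_number : Int) (out : List (Int × Int × Int)) : Prop := out = three_state_lookup_table_alt rule_number
instance (rule_number : Int) (out : List (Int × Int × Int)) : Decidable (Spec_three_state_lookup_table rule_number out) := by unfold Spec_three_state_lookup_table; infer_instance

-- ===== CLAIM (what is proved, stated in full; the proofs are below) =====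
def Claim_equal_three_state_lookup_table : Prop := ∀ (rule_number : Int), Dom_three_state_lookup_table rule_number → Pre_three_state_lookup_table rule_number → Spec_three_state_lookup_table rule_number (three_state_lookup_table rule_number)

-- ===== LEMMAS AND PROOFS =====

lemma pvTernLoop_append (n : Int) (acc : List String) :
    pvTernLoop n acc = acc ++ pvTernLoop n [] := by
  have H : ∀ m : Nat, ∀ n : Int, n.toNat = m → ∀ acc : List String,
      pvTernLoop n acc = acc ++ pvTernLoop n [] := by
    intro m
    induction m using Nat.strong_induction_on with
    | _ m ih =>
      intro n hm acc
      by_cases h : 0 < n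
      · have hd : (PySem.Int.floordiv n 3).toNat < m := by
          rw [PySem.Int.floordiv_eq_ediv_of_pos (by norm_num)]; omega
        rw [pvTernLoop]; rw [if_pos h]
        rw [ih _ hd _ rfl]
        conv_rhs => rw [pvTernLoop]; rw [if_pos h]
        conv_rhs => rw [ih _ hd _ rfl]
        simp
      · rw [pvTernLoop, if_neg h]
        conv_rhs => rw [pvTernLoop]; rw [if_neg h]
        simp
  exact H n.toNat n rfl acc

lemma pvIntercalateNil (xs : List (List Char)) : List.intercalate [] xs = xs.flatten := by
  simp [List.intercalate]
  induction xs with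
  | nil => simp
  | cons a t ih => cases t <;> simp_all [List.intersperse]

lemma pvJoinFlatten (ss : List String) :
    (PySem.Str.join "" ss).toList = (ss.map String.toList).flatten := by
  rw [PySem.Str.toList_join, PySem.Chars.join]
  simp [pvIntercalateNil]

-- the digit characters of A's loop output, read least-significant first and padded to k
lemma pvDigitsCore (k : Nat) : ∀ n : Int, 0 ≤ n → n < 3 ^ k →
    ((((pvTernLoop n []).reverse.map String.toList).flatten).reverse
       ++ List.replicate (k - (((pvTernLoop n []).reverse.map String.toList).flatten).length) '0').map
      (fun c => (PySem.Int.ofChars? [c]).getD 0)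
    = (List.range k).map (fun i => n / 3 ^ i % 3) := by
  induction k with
  | zero =>
    intro n h0 hlt
    have hn : n = 0 := by omega
    subst hn
    rw [pvTernLoop]
    norm_num
  | succ k ih =>
    intro n h0 hlt
    by_cases h : 0 < n
    · rw [pvTernLoop, if_pos h, pvTernLoop_append,
        PySem.Int.floordiv_eq_ediv_of_pos (by norm_num : (0:Int) < 3),
        PySem.Int.mod_eq_emod_of_pos (by norm_num : (0:Int) < 3)]
      have hq0 : 0 ≤ n / 3 := by omega
      have hqlt : n / 3 < 3 ^ k := by
        have h3 : (3:Int) ^ (k+1) = 3 ^ k * 3 := by ring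
        omega
      have hr : n % 3 = 0 ∨ n % 3 = 1 ∨ n % 3 = 2 := by omega
      have ih' := ih _ hq0 hqlt
      simp only [List.map_append] at ih'
      rcases hr with h1 | h1 | h1 <;>
      · rw [h1]
        first
        | rw [(by decide : PySem.Int.toStr (0:Int) = "0")]
        | rw [(by decide : PySem.Int.toStr (1:Int) = "1")]
        | rw [(by decide : PySem.Int.toStr (2:Int) = "2")]
        simp only [List.nil_append, List.reverse_cons, List.reverse_append,
          List.reverse_nil, List.map_append, List.map_cons, List.map_nil, List.flatten_append,
          List.flatten_cons, List.flatten_nil, List.append_nil, List.cons_append,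
          (by decide : ("0":String).toList = ['0']), (by decide : ("1":String).toList = ['1']),
          (by decide : ("2":String).toList = ['2']),
          List.length_append, List.length_cons, List.length_nil, Nat.add_sub_add_right]
        rw [List.range_succ_eq_map, List.map_cons, List.map_map]
        rw [ih']
        refine congrArg₂ List.cons ?_ ?_
        · first
          | rw [(by decide : ((PySem.Int.ofChars? ['0']).getD 0 : Int) = 0)]
          | rw [(by decide : ((PySem.Int.ofChars? ['1']).getD 0 : Int) = 1)]
          | rw [(by decide : ((PySem.Int.ofChars? ['2']).getD 0 : Int) = 2)]
          simp only [pow_zero, Int.ediv_one]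
          omega
        · refine List.map_congr_left ?_
          intro i _
          simp only [Function.comp_apply]
          rw [Int.ediv_ediv_of_nonneg (by norm_num : (0:Int) ≤ 3), ← pow_succ']
    · have hn : n = 0 := by omega
      subst hn
      rw [pvTernLoop]
      norm_num
      decide

-- ===== VERDICT (by name: the statement is the Claim_ definition above) =====
theorem three_state_lookup_table_spec : Claim_equal_three_state_lookup_table := by
  intro n _ hpre
  obtain ⟨h0, h1⟩ := hpre
  unfold Spec_three_state_lookup_table
  simp only [three_state_lookup_table, three_state_lookup_table_alt]
  rw [pvJoinFlatten, List.reverse_append, List.reverse_replicate,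
    pvDigitsCore 9 n h0 (show n < 3 ^ 9 by norm_num; omega)]
  norm_num [List.range_succ, PySem.List.enumerate_cons, PySem.List.enumerate_nil, List.zip,
    PySem.Int.floordiv_eq_ediv_of_pos, PySem.Int.mod_eq_emod_of_pos]
  norm_num [Int.toNat]
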